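-- pv_equiv track=rewrite | github.com/201803854/algorithm | 둘만의 암호.py | solution
-- ===== SOURCE A (Python) =====
-- def solution(s, skip, index):
--     answer = ''
--     skip_set = set(skip)  # skip 문자열을 집합(set)으로 변환하여 효율적인 탐색을 위해 활용
--
--     for char in s:
--         count = 0
--         check = 0
--         replaced_char = char  # replaced_char 변수를 밖으로 이동
--
--         while True:
--             replaced_char = chr((ord(char) +1 + count - 97) % 26 + 97)
--
--             if replaced_char not in skip_set:
--                 count += 1
--             else:
--                 count += 1
--                 check += 1
--
--             if count >= index + check:
--                 break
--         replaced_char = chr((ord(char) + count - 97) % 26 + 97)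
--         answer += replaced_char
--
--     return answer
-- ===== SOURCE B (Python) =====
-- def solution(s, skip, index):
--     # Precompute, per starting residue, the offsets (1..26) landing on non-skip
--     # letters; then jump straight to the target letter with divmod instead of
--     # stepping index times.
--     k = sum(1 for i in range(26) if chr(i + 97) not in skip)
--     offsets = [[j for j in range(1, 27) if chr((r0 + j) % 26 + 97) not in skip]
--                for r0 in range(26)]
--     out = []
--     for char in s:
--         r0 = (ord(char) - 97) % 26
--         q, r = divmod(index - 1, k)
--         out.append(chr((r0 + 26 * q + offsets[r0][r]) % 26 + 97))
--     return ''.join(out)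
-- ===== Notes on version B (the rewrite author's own statement) =====
-- stated objective: faster
-- what changed: A steps the cipher letter-by-letter with an O(index) while loop per character; B precomputes the 26 allowed-offset lists once and jumps straight to the target letter with one divmod per character; Pre_ restricts index to the natural domain index >= 1 (index is a 1-based step count; on index <= 0 A's forced single step, possibly onto a skipped letter, is an accident of its do-while loop) and excludes the all-letters-skipped case where A never returns.
-- outside the precondition, e.g. on solution('a', '', 0): A returns 'b', B returns 'a'
import Mathlib
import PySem

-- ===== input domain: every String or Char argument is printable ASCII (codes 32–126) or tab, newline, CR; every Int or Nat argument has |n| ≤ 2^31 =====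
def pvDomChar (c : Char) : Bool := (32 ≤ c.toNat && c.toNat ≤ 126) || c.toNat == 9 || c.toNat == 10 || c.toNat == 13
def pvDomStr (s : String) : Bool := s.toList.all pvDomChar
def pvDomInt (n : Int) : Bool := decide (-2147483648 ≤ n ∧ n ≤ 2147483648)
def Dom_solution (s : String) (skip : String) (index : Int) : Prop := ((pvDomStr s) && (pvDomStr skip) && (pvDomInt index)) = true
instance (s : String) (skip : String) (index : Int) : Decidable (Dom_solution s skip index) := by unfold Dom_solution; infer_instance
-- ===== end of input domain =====

-- B replaces A's step-by-step while loop (O(index) work per character) by a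
-- precomputed allowed-offset table and a single divmod jump per character;
-- equal return values are proved on Pre_ (neither program mutates anything).

-- ===== PORT A =====
-- chr((t) % 26 + 97), the letter computation both Pythons share
def pvChr (t : Int) : Char := Char.ofNat ((PySem.Int.mod t 26 + 97).toNat)

-- A's 'while True' loop, returning the final 'count'; the fuel argument only
-- makes the recursion total (in 'solution' it is proved sufficient under Pre_)
def pvLoopA (skipSet : PySem.Set Char) (index : Int) (ch : Int) :
    Nat → Int → Int → Int
  | 0, count, _check => count
  | fuel+1, count, check =>
      let replaced := pvChr (ch + 1 + count - 97)
      let (count', check') :=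
        if ¬ (replaced ∈ skipSet) then (count + 1, check)
        else (count + 1, check + 1)
      if count' ≥ index + check' then count'
      else pvLoopA skipSet index ch fuel count' check'

def solution (s : String) (skip : String) (index : Int) : String :=
  let skipSet : PySem.Set Char := PySem.Set.ofList skip.toList
  s.toList.foldl (fun answer char =>
    let ch : Int := char.toNat
    let count := pvLoopA skipSet index ch (26 * index.toNat + 27) 0 0
    answer.push (pvChr (ch + count - 97))) ""

-- ===== PORT B =====
def solution_alt (s : String) (skip : String) (index : Int) : String :=
  let k : Int :=
    (((PySem.List.pyRange 0 26 1).filter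
        (fun i => !(skip.toList.contains (Char.ofNat (i.toNat + 97))))).length : Int)
  let offsets : List (List Int) :=
    (PySem.List.pyRange 0 26 1).map (fun r0 =>
      (PySem.List.pyRange 1 27 1).filter
        (fun j => !(skip.toList.contains (pvChr (r0 + j)))))
  let out : List Char := s.toList.map (fun char =>
    let r0 : Int := PySem.Int.mod ((char.toNat : Int) - 97) 26
    let qr := (PySem.Int.divmod? (index - 1) k).getD (0, 0)
    pvChr (r0 + (26 * qr.1 + PySem.List.pyGetD (PySem.List.pyGetD offsets r0 []) qr.2 0)))
  String.ofList out

-- ===== PRECONDITION & SPEC =====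
-- index is a 1-based step count, so Pre_ restricts it to its natural domain
-- index ≥ 1 (on index ≤ 0 A's single forced step, possibly onto a skipped
-- letter, is an accident of its do-while loop and B's modular jump gives a
-- different value), and requires some non-skipped letter when s is non-empty
-- (otherwise A's while loop never returns and B raises ZeroDivisionError).
def Pre_solution (s : String) (skip : String) (index : Int) : Prop :=
  s = "" ∨ (1 ≤ index ∧
    ((List.range 26).filter (fun i => !(skip.toList.contains (Char.ofNat (i + 97)))) ≠ []))
instance (s : String) (skip : String) (index : Int) : Decidable (Pre_solution s skip index) := by
  unfold Pre_solution; infer_instance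

def pvWitness_solution : String × String × Int := ("zab c", "ace", 5)

def Spec_solution (s : String) (skip : String) (index : Int) (out : String) : Prop := out = solution_alt s skip index
instance (s : String) (skip : String) (index : Int) (out : String) : Decidable (Spec_solution s skip index out) := by unfold Spec_solution; infer_instance

-- ===== CLAIM (what is proved, stated in full; the proofs are below) =====
def Claim_equal_solution : Prop := ∀ (s : String) (skip : String) (index : Int), Dom_solution s skip index → Pre_solution s skip index → Spec_solution s skip index (solution s skip index)

-- ===== LEMMAS AND PROOFS =====

-- Bool test "offset argument t lands on a letter not in skip"
def pvAl (skip : String) (t : Int) : Bool := !(skip.toList.contains (pvChr t))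

-- number of allowed offsets among 1..c (p j = "offset j is allowed")
def pvNp (p : Nat → Bool) (c : Nat) : Nat := (List.range c).countP (fun i => p (i + 1))

-- the allowed offsets among 1..26, in increasing order
def pvOffs (p : Nat → Bool) : List Nat := ((List.range 26).map (· + 1)).filter p

theorem pvChr_congr (t t' : Int) (h : t % 26 = t' % 26) : pvChr t = pvChr t' := by
  unfold pvChr
  rw [PySem.Int.mod_eq_emod_of_pos (by norm_num), PySem.Int.mod_eq_emod_of_pos (by norm_num), h]

theorem pvAl_congr (skip : String) (t t' : Int) (h : t % 26 = t' % 26) : pvAl skip t = pvAl skip t' := by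
  unfold pvAl; rw [pvChr_congr t t' h]

theorem pvRot (p : Nat → Bool) (hp : ∀ j, p (j + 26) = p j) (a : Nat) :
    (List.range 26).countP (fun i => p (a + i)) = (List.range 26).countP p := by
  induction a with
  | zero => simp
  | succ a ih =>
    rw [← ih]
    have h1 : (List.range 26) = List.range 25 ++ [25] := by decide
    have h2 : (List.range 26) = 0 :: (List.range 25).map (· + 1) := by decide
    calc (List.range 26).countP (fun i => p (a + 1 + i))
        = (List.range 25).countP (fun i => p (a + 1 + i)) + [25].countP (fun i => p (a + 1 + i)) := by
          rw [h1, List.countP_append]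
      _ = (List.range 25).countP (fun i => p (a + 1 + i)) + (if p a then 1 else 0) := by
          simp only [List.countP_cons, List.countP_nil]
          have h0 : a + 1 + 25 = a + 26 := by omega
          simp [h0, hp a]
      _ = (List.range 26).countP (fun i => p (a + i)) := by
          rw [h2]
          simp only [List.countP_cons, List.countP_map]
          have h3 : ((fun i => p (a + i)) ∘ fun x => x + 1) = (fun i => p (a + 1 + i)) := by
            funext i; simp only [Function.comp_apply]; congr 1; omega
          rw [h3, Nat.add_zero]
          simp

theorem pvNp_mono (p : Nat → Bool) {c c' : Nat} (h : c ≤ c') : pvNp p c ≤ pvNp p c' := by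
  unfold pvNp
  obtain ⟨d, rfl⟩ := Nat.exists_eq_add_of_le h
  rw [List.range_add, List.countP_append]
  omega

theorem pvOffs_len (p : Nat → Bool) : (pvOffs p).length = (List.range 26).countP (fun i => p (i + 1)) := by
  unfold pvOffs
  rw [← List.countP_eq_length_filter, List.countP_map]
  rfl

theorem pvNp_add_26 (p : Nat → Bool) (hp : ∀ j, p (j + 26) = p j) (c : Nat) :
    pvNp p (c + 26) = pvNp p c + (pvOffs p).length := by
  unfold pvNp
  rw [List.range_add, List.countP_append, pvOffs_len]
  congr 1
  rw [List.countP_map]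
  exact pvRot (fun j => p (j + 1))
    (fun j => by show p (j + 26 + 1) = p (j + 1); rw [Nat.add_right_comm]; exact hp (j + 1)) c

theorem pvNp_mul (p : Nat → Bool) (hp : ∀ j, p (j + 26) = p j) (m t : Nat) :
    pvNp p (26 * m + t) = m * (pvOffs p).length + pvNp p t := by
  induction m with
  | zero => simp
  | succ m ih =>
    have h : 26 * (m + 1) + t = (26 * m + t) + 26 := by omega
    rw [h, pvNp_add_26 p hp, ih]; ring

-- the r-th allowed offset e: exactly r+1 allowed offsets in 1..e, at most r in any shorter prefix
theorem pvNth (p : Nat → Bool) :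
    ∀ (n r : Nat) (h : r < (((List.range n).map (· + 1)).filter p).length),
      pvNp p ((((List.range n).map (· + 1)).filter p)[r]) = r + 1 ∧
      ∀ t < (((List.range n).map (· + 1)).filter p)[r], pvNp p t ≤ r := by
  intro n
  induction n with
  | zero => intro r h; simp at h
  | succ n ih =>
    intro r h
    have hsplit : ((List.range (n+1)).map (· + 1)).filter p
        = (((List.range n).map (· + 1)).filter p) ++ (if p (n+1) then [n+1] else []) := by
      rw [List.range_succ, List.map_append, List.filter_append]
      by_cases hpn : p (n + 1) <;> simp [hpn]
    have hlenN : (((List.range n).map (· + 1)).filter p).length = pvNp p n := by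
      rw [← List.countP_eq_length_filter, List.countP_map]; rfl
    have hNsucc : pvNp p (n + 1) = pvNp p n + (if p (n + 1) then 1 else 0) := by
      unfold pvNp
      rw [List.range_succ, List.countP_append]
      simp
    by_cases hr : r < (((List.range n).map (· + 1)).filter p).length
    · have hget : (((List.range (n+1)).map (· + 1)).filter p)[r]'h
          = (((List.range n).map (· + 1)).filter p)[r]'hr := by
        simp only [hsplit]
        exact List.getElem_append_left hr
      rw [hget]
      exact ih r hr
    · -- r = old length, and p (n+1) must be true
      have hlen : ((((List.range (n+1)).map (· + 1)).filter p)).length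
          = (((List.range n).map (· + 1)).filter p).length + (if p (n+1) then 1 else 0) := by
        rw [hsplit, List.length_append]
        by_cases hpn : p (n + 1) <;> simp [hpn]
      have hpn : p (n + 1) = true := by
        by_contra hc
        simp [hc] at hlen
        omega
      have hre : r = (((List.range n).map (· + 1)).filter p).length := by
        rw [hlen, hpn] at h; simp at h; omega
      have hget : (((List.range (n+1)).map (· + 1)).filter p)[r]'h = n + 1 := by
        simp only [hsplit, hpn, if_pos]
        rw [List.getElem_append_right (by omega)]
        simp [hre]
      rw [hget]
      constructor
      · rw [hNsucc, hpn, hlenN] at *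
        simp
        omega
      · intro t ht
        have : t ≤ n := by omega
        calc pvNp p t ≤ pvNp p n := pvNp_mono p this
          _ = r := by rw [hre, hlenN]

theorem pvLoopA_eq (skipSet : PySem.Set Char) (index ch : Int) (p : Nat → Bool)
    (hm : ∀ c : Nat, (pvChr (ch + 1 + (c : Int) - 97) ∈ skipSet) ↔ p (c + 1) = false) :
    ∀ (fuel c cstar : Nat), c < cstar → cstar ≤ c + fuel →
      ((index : Int) ≤ (pvNp p cstar : Int)) →
      (∀ c', c < c' → c' < cstar → ((pvNp p c' : Int) < index)) →
      pvLoopA skipSet index ch fuel (c : Int) ((c : Int) - (pvNp p c : Int)) = (cstar : Int) := by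
  intro fuel
  induction fuel with
  | zero => intro c cstar h1 h2 _ _; omega
  | succ fuel ih =>
    intro c cstar h1 h2 hbrk hmin
    have hNle : pvNp p c ≤ c := by
      unfold pvNp; calc (List.range c).countP _ ≤ (List.range c).length := List.countP_le_length
        _ = c := List.length_range
    have hNsucc : pvNp p (c + 1) = pvNp p c + (if p (c + 1) then 1 else 0) := by
      unfold pvNp; rw [List.range_succ, List.countP_append]; simp
    have hNle' : pvNp p (c + 1) ≤ c + 1 := by
      unfold pvNp; calc (List.range (c+1)).countP _ ≤ (List.range (c+1)).length := List.countP_le_length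
        _ = c + 1 := List.length_range
    simp only [pvLoopA]
    by_cases hb : p (c + 1) = true
    · have hmem : (pvChr (ch + 1 + (c : Int) - 97) ∈ skipSet) = False := by
        simp only [eq_iff_iff, iff_false]; rw [hm c]; simp [hb]
      simp only [hmem, not_false_eq_true, ite_true]
      by_cases hcs : c + 1 = cstar
      · have htest : ((c : Int) + 1 ≥ index + ((c : Int) - (pvNp p c : Int))) := by
          have hN : pvNp p cstar = pvNp p c + 1 := by rw [← hcs, hNsucc, hb]; simp
          omega
        rw [if_pos htest]; omega
      · have hN : pvNp p (c + 1) = pvNp p c + 1 := by rw [hNsucc, hb]; simp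
        have hm1 := hmin (c + 1) (by omega) (by omega)
        have htest : ¬ ((c : Int) + 1 ≥ index + ((c : Int) - (pvNp p c : Int))) := by omega
        rw [if_neg htest]
        have hres := ih (c + 1) cstar (by omega) (by omega) hbrk (fun c' hc1 hc2 => hmin c' (by omega) hc2)
        have hc1 : ((c + 1 : Nat) : Int) = (c : Int) + 1 := by push_cast; ring
        have hc2 : ((c + 1 : Nat) : Int) - (pvNp p (c + 1) : Int) = (c : Int) - (pvNp p c : Int) := by
          rw [hN]; push_cast; ring
        rw [hc2, hc1] at hres
        exact hres
    · have hmem : (pvChr (ch + 1 + (c : Int) - 97) ∈ skipSet) = True := by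
        simp only [eq_iff_iff, iff_true]; rw [hm c]; simpa using hb
      simp only [hmem, not_true_eq_false, ite_false]
      have hN : pvNp p (c + 1) = pvNp p c := by rw [hNsucc]; simp [hb]
      by_cases hcs : c + 1 = cstar
      · have htest : ((c : Int) + 1 ≥ index + ((c : Int) - (pvNp p c : Int) + 1)) := by
          have hN2 : pvNp p cstar = pvNp p c := by rw [← hcs, hN]
          omega
        rw [if_pos htest]; omega
      · have hm1 := hmin (c + 1) (by omega) (by omega)
        have htest : ¬ ((c : Int) + 1 ≥ index + ((c : Int) - (pvNp p c : Int) + 1)) := by omega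
        rw [if_neg htest]
        have hres := ih (c + 1) cstar (by omega) (by omega) hbrk (fun c' hc1 hc2 => hmin c' (by omega) hc2)
        have hc1 : ((c + 1 : Nat) : Int) = (c : Int) + 1 := by push_cast; ring
        have hc2 : ((c + 1 : Nat) : Int) - (pvNp p (c + 1) : Int) = (c : Int) - (pvNp p c : Int) + 1 := by
          rw [hN]; push_cast; ring
        rw [hc2, hc1] at hres
        exact hres

theorem pvNth' (p : Nat → Bool) (r : Nat) (h : r < (pvOffs p).length) :
    pvNp p ((pvOffs p)[r]) = r + 1 ∧ ∀ t < (pvOffs p)[r], pvNp p t ≤ r :=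
  pvNth p 26 r h

theorem pvChr_small (i : Nat) (h : i < 26) : pvChr (i : Int) = Char.ofNat (i + 97) := by
  unfold pvChr
  rw [PySem.Int.mod_eq_emod_of_pos (by norm_num)]
  congr 1
  omega

theorem pv_char (skip : String) (index : Int) (ch : Int)
    (hidx : 1 ≤ index)
    (hk : ((List.range 26).filter (fun i => !(skip.toList.contains (Char.ofNat (i + 97)))) ≠ [])) :
    pvChr (ch + pvLoopA (PySem.Set.ofList skip.toList) index ch (26 * index.toNat + 27) 0 0 - 97)
      = pvChr (PySem.Int.mod (ch - 97) 26 +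
          (26 * ((PySem.Int.divmod? (index - 1)
               ((((PySem.List.pyRange 0 26 1).filter
                 (fun i => !(skip.toList.contains (Char.ofNat (i.toNat + 97))))).length : Int))).getD (0, 0)).1 +
             PySem.List.pyGetD
               (PySem.List.pyGetD
                 ((PySem.List.pyRange 0 26 1).map (fun r0 =>
                   (PySem.List.pyRange 1 27 1).filter
                     (fun j => !(skip.toList.contains (pvChr (r0 + j)))))) (PySem.Int.mod (ch - 97) 26) [])
               ((PySem.Int.divmod? (index - 1)
               ((((PySem.List.pyRange 0 26 1).filter
                 (fun i => !(skip.toList.contains (Char.ofNat (i.toNat + 97))))).length : Int))).getD (0, 0)).2 0)) := by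
  -- shared setup
  have hb0 : 0 ≤ (ch - 97) % 26 ∧ (ch - 97) % 26 < 26 := ⟨Int.emod_nonneg _ (by norm_num), Int.emod_lt_of_pos _ (by norm_num)⟩
  set b0 : Nat := ((ch - 97) % 26).toNat with hb0def
  have hb0c : ((b0 : Int)) = (ch - 97) % 26 := by omega
  have hmod : PySem.Int.mod (ch - 97) 26 = ((b0 : Int)) := by
    rw [PySem.Int.mod_eq_emod_of_pos (by norm_num)]; omega
  set g : Nat → Bool := fun j => pvAl skip (j : Int) with hgdef
  set p : Nat → Bool := fun j => pvAl skip ((b0 + j : Nat) : Int) with hpdef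
  have hp : ∀ j, p (j + 26) = p j := by
    intro j
    show pvAl skip ((b0 + (j + 26) : Nat) : Int) = pvAl skip ((b0 + j : Nat) : Int)
    apply pvAl_congr
    push_cast
    omega
  have hm : ∀ c : Nat, (pvChr (ch + 1 + (c : Int) - 97) ∈ PySem.Set.ofList skip.toList) ↔ p (c + 1) = false := by
    intro c
    rw [PySem.Set.mem_ofList]
    have hchr : pvChr (ch + 1 + (c : Int) - 97) = pvChr ((b0 + (c + 1) : Nat) : Int) := by
      apply pvChr_congr; push_cast; omega
    rw [hchr]
    show _ ↔ pvAl skip ((b0 + (c + 1) : Nat) : Int) = false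
    unfold pvAl
    rw [← List.contains_iff_mem]
    cases h : skip.toList.contains (pvChr ((b0 + (c + 1) : Nat) : Int)) <;> simp
  -- the port's k equals K0 := countP g (range 26), the number of allowed letters
  set K0 : Nat := (List.range 26).countP g with hK0def
  have hcongr_letters : ∀ i ∈ List.range 26,
      ((!(skip.toList.contains (Char.ofNat (i + 97)))) = true ↔ g i = true) := by
    intro i hi
    rw [List.mem_range] at hi
    show _ ↔ pvAl skip (i : Int) = true
    unfold pvAl
    rw [pvChr_small i hi]
  have hkK0 : ((List.range 26).filter (fun i => !(skip.toList.contains (Char.ofNat (i + 97))))).length = K0 := by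
    rw [← List.countP_eq_length_filter]
    exact List.countP_congr hcongr_letters
  have hK0pos : 0 < K0 := by
    rcases List.exists_mem_of_ne_nil _ hk with ⟨x, hx⟩
    have : 0 < ((List.range 26).filter (fun i => !(skip.toList.contains (Char.ofNat (i + 97))))).length :=
      List.length_pos_of_mem hx
    omega
  have hkport : (((PySem.List.pyRange 0 26 1).filter
      (fun i => !(skip.toList.contains (Char.ofNat (i.toNat + 97))))).length) = K0 := by
    rw [PySem.List.pyRange_one]
    rw [List.filter_map]
    rw [List.length_map, ← List.countP_eq_length_filter]
    rw [show ((26:Int) - 0).toNat = 26 by decide]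
    rw [← hkK0, ← List.countP_eq_length_filter]
    apply List.countP_congr
    intro i hi
    simp only [Function.comp_apply]
    rw [show ((0 : Int) + (i : Nat)) = ((i : Nat) : Int) by ring, Int.toNat_natCast]
  have hgper : ∀ j, g (j + 26) = g j := by
    intro j
    show pvAl skip (((j + 26 : Nat)) : Int) = pvAl skip ((j : Nat) : Int)
    apply pvAl_congr; push_cast; omega
  have hoffK : (pvOffs p).length = K0 := by
    rw [pvOffs_len]
    calc (List.range 26).countP (fun i => p (i + 1))
        = (List.range 26).countP (fun i => g ((b0 + 1) + i)) := by
          apply List.countP_congr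
          intro i _
          show p (i + 1) = true ↔ g ((b0 + 1) + i) = true
          rw [hpdef, hgdef]
          simp only []
          rw [show b0 + (i + 1) = b0 + 1 + i by omega]
      _ = K0 := pvRot g hgper (b0 + 1)
  have hK0ne : ((K0 : Nat) : Int) ≠ 0 := by
    simp only [ne_eq, Nat.cast_eq_zero]; omega
  set q : Int := PySem.Int.floordiv (index - 1) ((K0 : Nat) : Int) with hqdef
  set r : Int := PySem.Int.mod (index - 1) ((K0 : Nat) : Int) with hrdef
  have hdm : (PySem.Int.divmod? (index - 1) ((K0 : Nat) : Int)).getD (0, 0) = (q, r) := by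
    have hK00 : ¬ (K0 = 0) := by omega
    rw [hqdef, hrdef]
    simp [PySem.Int.divmod?, hK00, PySem.Int.floordiv, PySem.Int.mod]
  have hqk : q * K0 + r = index - 1 := PySem.Int.floordiv_mul_add_mod (index - 1) ((K0 : Nat) : Int)
  have hr0 : 0 ≤ r ∧ r < (K0 : Int) := by
    constructor
    · exact PySem.Int.mod_nonneg _ (by omega)
    · exact PySem.Int.mod_lt _ (by omega)
  have hqe : q = (index - 1) / ((K0 : Nat) : Int) := PySem.Int.floordiv_eq_ediv_of_pos (by omega)
  have hq0 : 0 ≤ q := by rw [hqe]; exact Int.ediv_nonneg (by omega) (by omega)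
  have hqle : q ≤ index - 1 := by rw [hqe]; exact Int.ediv_le_self _ (by omega)
  set rhat : Nat := r.toNat with hrhatdef
  set qhat : Nat := q.toNat with hqhatdef
  have hrc : ((rhat : Nat) : Int) = r := by omega
  have hqc : ((qhat : Nat) : Int) = q := by omega
  have hrlen : rhat < (pvOffs p).length := by rw [hoffK]; omega
  have hnth := pvNth' p rhat hrlen
  set e : Nat := (pvOffs p)[rhat]'hrlen with hedef
  have hemem : e ∈ pvOffs p := List.getElem_mem hrlen
  have hebound : 1 ≤ e ∧ e ≤ 26 := by
    unfold pvOffs at hemem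
    rcases List.mem_filter.mp hemem with ⟨hm1, _⟩
    rcases List.mem_map.mp hm1 with ⟨i, hi, heq⟩
    rw [List.mem_range] at hi
    omega
  set cstar : Nat := 26 * qhat + e with hcstardef
  have hNe : pvNp p e = rhat + 1 := hnth.1
  have hNcstar : pvNp p cstar = qhat * K0 + (rhat + 1) := by
    rw [hcstardef, pvNp_mul p hp qhat e, hoffK, hNe]
  have hbrk : (index : Int) ≤ (pvNp p cstar : Int) := by
    rw [hNcstar]; push_cast; rw [hqc, hrc]; linarith [hqk]
  have hmin : ∀ c', 0 < c' → c' < cstar → ((pvNp p c') : Int) < index := by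
    intro c' hc1 hc2
    have hstep : pvNp p c' ≤ pvNp p (cstar - 1) := pvNp_mono p (by omega)
    have hsub : cstar - 1 = 26 * qhat + (e - 1) := by omega
    have : pvNp p (cstar - 1) = qhat * K0 + pvNp p (e - 1) := by
      rw [hsub, pvNp_mul p hp qhat (e - 1), hoffK]
    have hle : pvNp p (e - 1) ≤ rhat := hnth.2 (e - 1) (by omega)
    have hle2 : pvNp p c' ≤ qhat * K0 + rhat := by
      rw [this] at hstep
      exact le_trans hstep (Nat.add_le_add_left hle _)
    have hcast : ((qhat * K0 + rhat : Nat) : Int) = q * K0 + r := by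
      push_cast; rw [hqc, hrc]
    have hle3 : ((pvNp p c' : Nat) : Int) ≤ ((qhat * K0 + rhat : Nat) : Int) := by
      exact_mod_cast hle2
    rw [hcast] at hle3
    linarith [hqk]
  have hfuel : cstar ≤ 0 + (26 * index.toNat + 27) := by
    have hcc : (cstar : Int) = 26 * q + e := by rw [hcstardef]; push_cast; rw [hqc]
    omega
  have hloop := pvLoopA_eq (PySem.Set.ofList skip.toList) index ch p hm
    (26 * index.toNat + 27) 0 cstar (by omega) hfuel hbrk
    (fun c' h1 h2 => hmin c' h1 h2)
  have h0 : pvNp p 0 = 0 := by unfold pvNp; simp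
  rw [h0] at hloop
  simp only [Nat.cast_zero, sub_zero] at hloop
  rw [hloop]
  -- reduce the B side
  rw [hmod, hkport, hdm]
  have houter : PySem.List.pyGetD
      ((PySem.List.pyRange 0 26 1).map (fun r0 =>
        (PySem.List.pyRange 1 27 1).filter
          (fun j => !(skip.toList.contains (pvChr (r0 + j)))))) ((b0 : Nat) : Int) []
      = (PySem.List.pyRange 1 27 1).filter
          (fun j => !(skip.toList.contains (pvChr (((b0 : Nat) : Int) + j)))) := by
    exact PySem.List.pyGetD_map_pyRange_of_nonneg _ 26 ((b0 : Nat) : Int) [] (by omega) (by omega)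
  rw [houter]
  set L : List Nat := (List.range 26).filter (fun k => p (k + 1)) with hLdef
  have hoffs : pvOffs p = L.map (· + 1) := by
    unfold pvOffs
    rw [List.filter_map, hLdef]
    rfl
  have hinner : (PySem.List.pyRange 1 27 1).filter
      (fun j => !(skip.toList.contains (pvChr (((b0 : Nat) : Int) + j))))
      = L.map (fun k => (1 : Int) + (k : Nat)) := by
    rw [PySem.List.pyRange_one]
    rw [show ((27 : Int) - 1).toNat = 26 by decide]
    rw [List.filter_map]
    rw [hLdef]
    refine congrArg (List.map _) (List.filter_congr ?_)
    intro k hk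
    simp only [Function.comp_apply]
    show (!(skip.toList.contains (pvChr (((b0 : Nat) : Int) + (1 + (k : Nat)))))) = p (k + 1)
    have harg : pvChr (((b0 : Nat) : Int) + (1 + (k : Nat))) = pvChr ((b0 + (k + 1) : Nat) : Int) := by
      apply pvChr_congr; push_cast; ring_nf
    rw [harg]
    rfl
  rw [hinner]
  have hrlenL : rhat < L.length := by
    have : (pvOffs p).length = L.length := by rw [hoffs, List.length_map]
    omega
  have hgete : PySem.List.pyGetD (L.map (fun k => (1 : Int) + (k : Nat))) r 0
      = 1 + ((L[rhat]'hrlenL : Nat) : Int) := by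
    rw [PySem.List.pyGetD_eq_getElem _ 0 (by omega)
      (by rw [List.length_map]; omega)]
    simp only [List.getElem_map]
    rfl
  rw [hgete]
  have heL : e = L[rhat]'hrlenL + 1 := by
    rw [hedef]
    simp only [hoffs, List.getElem_map]
  -- final congruence
  apply pvChr_congr
  have hcc : (cstar : Int) = 26 * q + e := by rw [hcstardef]; push_cast; rw [hqc]
  have hee : ((e : Nat) : Int) = 1 + ((L[rhat]'hrlenL : Nat) : Int) := by
    rw [heL]; push_cast; ring
  omega

theorem pvFoldPush (f : Char → Char) : ∀ (l : List Char) (acc : String),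
    (l.foldl (fun a c => a.push (f c)) acc).toList = acc.toList ++ l.map f := by
  intro l
  induction l with
  | nil => intro acc; simp
  | cons c cs ih =>
    intro acc
    simp only [List.foldl_cons, List.map_cons, ih, String.toList_push]
    simp

-- ===== VERDICT (by name: the statement is the Claim_ definition above) =====
theorem solution_spec : Claim_equal_solution := by
  intro s skip index _ hpre
  unfold Spec_solution solution solution_alt
  apply String.toList_inj.mp
  show (List.foldl (fun (answer : String) (char : Char) =>
      answer.push (pvChr ((char.toNat : Int) +
        pvLoopA (PySem.Set.ofList skip.toList) index (char.toNat : Int) (26 * index.toNat + 27) 0 0 - 97)))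
      "" s.toList).toList
    = (String.ofList (s.toList.map (fun char =>
        pvChr (PySem.Int.mod ((char.toNat : Int) - 97) 26 +
          (26 * ((PySem.Int.divmod? (index - 1)
               ((((PySem.List.pyRange 0 26 1).filter
                 (fun i => !(skip.toList.contains (Char.ofNat (i.toNat + 97))))).length : Int))).getD (0, 0)).1 +
             PySem.List.pyGetD
               (PySem.List.pyGetD
                 ((PySem.List.pyRange 0 26 1).map (fun r0 =>
                   (PySem.List.pyRange 1 27 1).filter
                     (fun j => !(skip.toList.contains (pvChr (r0 + j))))))
                 (PySem.Int.mod ((char.toNat : Int) - 97) 26) [])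
               ((PySem.Int.divmod? (index - 1)
               ((((PySem.List.pyRange 0 26 1).filter
                 (fun i => !(skip.toList.contains (Char.ofNat (i.toNat + 97))))).length : Int))).getD (0, 0)).2 0))))).toList
  simp only [pvFoldPush, String.toList_ofList, String.toList_empty, List.nil_append]
  rcases hpre with hs | ⟨hidx, hk⟩
  · subst hs; simp
  · apply List.map_congr_left
    intro char _
    exact pv_char skip index (char.toNat : Int) hidx hk
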